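-- pv_equiv track=rewrite | github.com/reSchool-org/reSchool-ios | main.py | build_period_tree
-- ===== SOURCE A (Python) =====
-- def build_period_tree(periods_list):
--     children = {}
--     roots = []
--
--     periods_list.sort(key=lambda x: x.get('date1', 0))
--
--     for p in periods_list:
--         pid = p.get('parentId')
--         if not pid:
--             roots.append(p)
--         else:
--             if pid not in children:
--                 children[pid] = []
--             children[pid].append(p)
--
--     result = []
--     def recurse(nodes, depth):
--         for node in nodes:
--             node['depth'] = depth
--             result.append(node)
--             node_id = node.get('id')
--             if node_id in children:
--                 recurse(children[node_id], depth + 1)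
--
--     recurse(roots, 0)
--     return result
-- ===== SOURCE B (Python) =====
-- def build_period_tree(periods_list):
--     # Pure recursive preorder: no children dict, no shared accumulator.
--     # Each node's children are found by filtering the sorted list; roots are
--     # the periods with a falsy parentId.  Mutates periods_list (sort) and the
--     # period dicts (sets 'depth'), like the original.
--     periods_list.sort(key=lambda x: x.get('date1', 0))
--
--     def kids(node_id):
--         return [p for p in periods_list
--                 if p.get('parentId') and p.get('parentId') == node_id]
--
--     def walk(nodes, depth):
--         out = []
--         for node in nodes:
--             node['depth'] = depth
--             out.append(node)
--             out.extend(walk(kids(node.get('id')), depth + 1))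
--         return out
--
--     roots = [p for p in periods_list if not p.get('parentId')]
--     return walk(roots, 0)
-- ===== Notes on version B (the rewrite author's own statement) =====
-- stated objective: simpler
-- what changed: The children dict and the shared result accumulator are gone: B is a pure recursive preorder that selects roots and each node's children by filtering the sorted list directly, trading the dict index for an O(n^2) scan.
-- outside the precondition, e.g. on build_period_tree([{'id': 1}, {'id': 1, 'parentId': 1}]): A raises RecursionError, B raises RecursionError
import Mathlib
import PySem

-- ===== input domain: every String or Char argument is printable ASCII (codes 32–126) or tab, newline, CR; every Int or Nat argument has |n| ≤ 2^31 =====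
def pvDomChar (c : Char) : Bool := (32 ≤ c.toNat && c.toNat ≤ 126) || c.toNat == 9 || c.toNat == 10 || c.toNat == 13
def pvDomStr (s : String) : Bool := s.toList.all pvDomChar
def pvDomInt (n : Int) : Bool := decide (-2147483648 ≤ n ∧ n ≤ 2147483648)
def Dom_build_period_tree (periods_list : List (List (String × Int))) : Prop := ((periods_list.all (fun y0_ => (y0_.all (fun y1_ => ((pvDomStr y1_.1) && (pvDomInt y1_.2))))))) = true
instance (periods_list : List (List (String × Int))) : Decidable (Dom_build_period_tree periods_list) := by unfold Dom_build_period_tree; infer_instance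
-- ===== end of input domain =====

-- B drops A's children dict and shared result accumulator: a pure recursive preorder
-- that selects roots and each node's children by filtering the sorted list directly
-- (simpler to read; an O(n^2) scan instead of the dict index).
-- Both A and B mutate their argument in place (sort, and 'depth' is written into each
-- visited dict); the equivalence proved here is about the RETURN value.

-- ===== PORT A =====

-- one pass of A's grouping loop: 'if not pid: roots.append(p)' else
-- 'if pid not in children: children[pid] = []; children[pid].append(p)'
-- (the else-branch is exactly Dict.modify pid [] (· ++ [p]))
def pvGroupStep (s : PySem.Dict Int (List (List (String × Int))) × List (List (String × Int)))
    (p : List (String × Int)) :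
    PySem.Dict Int (List (List (String × Int))) × List (List (String × Int)) :=
  match (PySem.Dict.mk p).get? "parentId" with
  | none => (s.1, s.2 ++ [p])                    -- pid = None, falsy
  | some pid =>
    if pid = 0 then (s.1, s.2 ++ [p])            -- pid = 0, falsy
    else (s.1.modify pid [] (· ++ [p]), s.2)

-- A's recursive 'recurse(nodes, depth)', accumulator = the shared 'result' list.
-- fuel: one unit per descent into a children list; n+1 suffices on Pre_ inputs.
def pvRecA (ch : PySem.Dict Int (List (List (String × Int)))) :
    Nat → List (List (String × Int)) → Int → List (List (String × Int)) →
    List (List (String × Int))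
  | 0, _, _, acc => acc
  | _ + 1, [], _, acc => acc
  | f + 1, node :: rest, depth, acc =>
    let node' := ((PySem.Dict.mk node).insert "depth" depth).items   -- node['depth'] = depth
    let acc1 := acc ++ [node']                                       -- result.append(node)
    let acc2 :=
      match (PySem.Dict.mk node').get? "id" with                     -- node_id = node.get('id')
      | none => acc1                                                 -- None is never a key
      | some nid =>
        match ch.get? nid with                                       -- if node_id in children:
        | none => acc1
        | some cs => pvRecA ch f cs (depth + 1) acc1                 --   recurse(children[node_id], depth+1)
    pvRecA ch (f + 1) rest depth acc2
  termination_by f nodes => (f, nodes.length)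

def build_period_tree (periods_list : List (List (String × Int))) : List (List (String × Int)) :=
  let S := PySem.List.sorted periods_list (fun x => (PySem.Dict.mk x).getD "date1" 0)
  let g := S.foldl pvGroupStep (PySem.Dict.empty, [])
  pvRecA g.1 (periods_list.length + 1) g.2 0 []

-- ===== PORT B =====

-- B's 'kids(node_id)' comprehension: 'p.get('parentId') and p.get('parentId') == node_id'
-- (truthy pid, equal to node_id; node_id may be None = Option.none, then never equal)
def pvKidsB (S : List (List (String × Int))) (nodeId : Option Int) :
    List (List (String × Int)) :=
  S.filter (fun p =>
    match (PySem.Dict.mk p).get? "parentId" with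
    | none => false
    | some v => decide (v ≠ 0) && (some v == nodeId))

-- B's 'walk(nodes, depth)': pure recursion building the preorder list by concatenation.
-- fuel: one unit per descent into a kids list; ample on Pre_ inputs (proved below).
def pvWalkB (S : List (List (String × Int))) :
    Nat → List (List (String × Int)) → Int → List (List (String × Int))
  | 0, _, _ => []
  | _ + 1, [], _ => []
  | f + 1, node :: rest, depth =>
    let node' := ((PySem.Dict.mk node).insert "depth" depth).items   -- node['depth'] = depth
    node' ::                                                          -- out.append(node)
      (pvWalkB S f (pvKidsB S ((PySem.Dict.mk node').get? "id")) (depth + 1)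
        ++ pvWalkB S (f + 1) rest depth)                              -- out.extend(walk(...))
  termination_by f nodes => (f, nodes.length)

def build_period_tree_alt (periods_list : List (List (String × Int))) : List (List (String × Int)) :=
  let S := PySem.List.sorted periods_list (fun x => (PySem.Dict.mk x).getD "date1" 0)
  let roots := S.filter (fun (p : List (String × Int)) =>   -- [p for p in periods_list if not p.get('parentId')]
    match (PySem.Dict.mk p).get? "parentId" with
    | none => true
    | some v => v == 0)
  let n := periods_list.length
  pvWalkB S (n * (n + 1) ^ (n + 1) + 1) roots 0

-- ===== PRECONDITION & SPEC =====

-- Pre_ excludes lists in which two periods carry the same 'id' value: there the traversal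
-- can revisit a dict (forever on a reachable id-cycle — RecursionError — and otherwise the
-- returned dicts' 'depth' values depend on object aliasing), an accident no one would specify.
def Pre_build_period_tree (periods_list : List (List (String × Int))) : Prop :=
  (periods_list.filterMap (fun p => (PySem.Dict.mk p).get? "id")).Nodup

instance (periods_list : List (List (String × Int))) : Decidable (Pre_build_period_tree periods_list) := by
  unfold Pre_build_period_tree; infer_instance

def pvWitness_build_period_tree : (List (List (String × Int))) :=
  [[("id", 1), ("date1", 5)], [("parentId", 1), ("id", 2), ("date1", 3)]]

def Spec_build_period_tree (periods_list : List (List (String × Int))) (out : List (List (String × Int))) : Prop := out = build_period_tree_alt periods_list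
instance (periods_list : List (List (String × Int))) (out : List (List (String × Int))) : Decidable (Spec_build_period_tree periods_list out) := by unfold Spec_build_period_tree; infer_instance

-- ===== CLAIM (what is proved, stated in full; the proofs are below) =====
def Claim_equal_build_period_tree : Prop := ∀ (periods_list : List (List (String × Int))), Dom_build_period_tree periods_list → Pre_build_period_tree periods_list → Spec_build_period_tree periods_list (build_period_tree periods_list)

-- ===== LEMMAS AND PROOFS =====

-- truthy parent id of a period (some = truthy)
def pvPid? (p : List (String × Int)) : Option Int :=
  match (PySem.Dict.mk p).get? "parentId" with
  | none => none
  | some v => if v = 0 then none else some v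

-- the 'id' entry of a period
def pvId? (p : List (String × Int)) : Option Int := (PySem.Dict.mk p).get? "id"

-- the (pid, p) pairs that A's grouping loop sends to the children dict
def pvPairs (S : List (List (String × Int))) : List (Int × List (String × Int)) :=
  S.filterMap (fun p => match pvPid? p with | none => none | some v => some (v, p))

theorem pvGroupStep_eq' (s : PySem.Dict Int (List (List (String × Int))) × List (List (String × Int)))
    (p : List (String × Int)) :
    pvGroupStep s p =
      match pvPid? p with
      | none => (s.1, s.2 ++ [p])
      | some v => (s.1.modify v [] (· ++ [p]), s.2) := by
  unfold pvGroupStep pvPid?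
  rcases h : (PySem.Dict.mk p).get? "parentId" with _ | v
  · rfl
  · by_cases hv : v = 0 <;> simp [hv]

theorem pvPairs_cons (p : List (String × Int)) (S : List (List (String × Int))) :
    pvPairs (p :: S) =
      match pvPid? p with
      | none => pvPairs S
      | some v => (v, p) :: pvPairs S := by
  unfold pvPairs
  rcases h : pvPid? p with _ | v <;> simp [h]

-- the children dict of the grouping fold is the modify-fold over pvPairs
theorem pvGroup_fst (S : List (List (String × Int)))
    (d : PySem.Dict Int (List (List (String × Int)))) (r : List (List (String × Int))) :
    (S.foldl pvGroupStep (d, r)).1 =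
      (pvPairs S).foldl (fun d q => d.modify q.1 [] (· ++ [q.2])) d := by
  induction S generalizing d r with
  | nil => rfl
  | cons p S ih =>
    rw [List.foldl_cons, pvGroupStep_eq', pvPairs_cons]
    rcases h : pvPid? p with _ | v
    · exact ih d (r ++ [p])
    · simpa using ih (d.modify v [] (· ++ [p])) r

-- the roots of the grouping fold
theorem pvGroup_snd (S : List (List (String × Int)))
    (d : PySem.Dict Int (List (List (String × Int)))) (r : List (List (String × Int))) :
    (S.foldl pvGroupStep (d, r)).2 = r ++ S.filter (fun p => (pvPid? p).isNone) := by
  induction S generalizing d r with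
  | nil => simp
  | cons p S ih =>
    rw [List.foldl_cons, pvGroupStep_eq', List.filter_cons]
    rcases h : pvPid? p with _ | v
    · simpa using ih d (r ++ [p])
    · simpa using ih (d.modify v [] (· ++ [p])) r

-- B's kids filter, expressed through pvPid?
theorem pvKidsB_eq (S : List (List (String × Int))) (nodeId : Option Int) :
    pvKidsB S nodeId = S.filter (fun p => pvPid? p == nodeId && (pvPid? p).isSome) := by
  unfold pvKidsB
  apply List.filter_congr
  intro p _
  unfold pvPid?
  rcases h : (PySem.Dict.mk p).get? "parentId" with _ | v
  · simp
  · by_cases hv : v = 0 <;> rcases nodeId with _ | nid <;> simp [hv]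

theorem pvKidsB_none (S : List (List (String × Int))) :
    pvKidsB S none = [] := by
  rw [pvKidsB_eq]
  apply List.filter_eq_nil_iff.mpr
  intro p _
  rcases h : pvPid? p with _ | v <;> simp [h]

theorem pvKidsB_mem (S : List (List (String × Int))) (nid : Int)
    (c : List (String × Int)) (hc : c ∈ pvKidsB S (some nid)) :
    c ∈ S ∧ pvPid? c = some nid := by
  rw [pvKidsB_eq] at hc
  simp only [List.mem_filter, Bool.and_eq_true, beq_iff_eq, Option.isSome_iff_exists] at hc
  exact ⟨hc.1, hc.2.1⟩

-- the pvPairs entries keyed by nid are exactly B's kids for (some nid)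
theorem pvPairs_filter_eq_kids (S : List (List (String × Int))) (nid : Int) :
    ((pvPairs S).filter (fun q => q.1 == nid)).map (·.2) = pvKidsB S (some nid) := by
  rw [pvKidsB_eq]
  induction S with
  | nil => rfl
  | cons p S ih =>
    rw [pvPairs_cons, List.filter_cons]
    rcases h : pvPid? p with _ | v
    · simp [h, ih]
    · by_cases hv : v = nid
      · subst hv; simp [h, ih]
      · simp [h, hv, ih]

-- the dict lookup in A, as B's filter
theorem pvCh_kids (S : List (List (String × Int))) (nid : Int) :
    (S.foldl pvGroupStep (PySem.Dict.empty, [])).1.getD nid [] = pvKidsB S (some nid) := by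
  have h1 := pvGroup_fst S PySem.Dict.empty []
  have h2 := PySem.Dict.getD_foldl_modify_append (pvPairs S) (PySem.Dict.empty) nid
  rw [h1.symm] at h2
  simp only [PySem.Dict.getD_empty, List.nil_append] at h2
  rw [pvPairs_filter_eq_kids] at h2
  exact h2

-- inserting 'depth' does not change the 'id' lookup
theorem pvId?_insert (node : List (String × Int)) (depth : Int) :
    (PySem.Dict.mk (((PySem.Dict.mk node).insert "depth" depth).items)).get? "id"
      = pvId? node := by
  unfold pvId?
  have : (PySem.Dict.mk (((PySem.Dict.mk node).insert "depth" depth).items))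
      = (PySem.Dict.mk node).insert "depth" depth := rfl
  rw [this, PySem.Dict.get?_insert]
  simp

-- B's recursion never exhausts its fuel
def pvWalkOK (S : List (List (String × Int))) : Nat → List (List (String × Int)) → Bool
  | 0, nodes => nodes.isEmpty
  | _ + 1, [] => true
  | f + 1, node :: rest =>
    pvWalkOK S f (pvKidsB S (pvId? node)) && pvWalkOK S (f + 1) rest
  termination_by f nodes => (f, nodes.length)

-- with sufficient fuel, extra fuel does not change pvWalkB
theorem pvWalkB_mono (S : List (List (String × Int))) :
    ∀ (f : Nat) (nodes : List (List (String × Int))),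
      pvWalkOK S f nodes = true →
      ∀ (g : Nat), f ≤ g → ∀ (depth : Int),
        pvWalkB S g nodes depth = pvWalkB S f nodes depth := by
  intro f
  induction f with
  | zero =>
    intro nodes hOK g _ depth
    have : nodes = [] := by simpa [pvWalkOK, List.isEmpty_iff] using hOK
    subst this
    cases g <;> simp [pvWalkB]
  | succ f ihf =>
    intro nodes
    induction nodes with
    | nil =>
      intro _ g _ depth
      cases g <;> simp [pvWalkB]
    | cons node rest ihn =>
      intro hOK g hg depth
      simp only [pvWalkOK, Bool.and_eq_true] at hOK
      obtain ⟨hOK1, hOK2⟩ := hOK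
      rcases g with _ | g'
      · omega
      · have hg' : f ≤ g' := by omega
        simp only [pvWalkB, pvId?_insert]
        rw [ihf _ hOK1 g' hg', ihn hOK2 (g' + 1) (by omega)]

-- ancestor chains of B's recursion (most recent ancestor first)
inductive pvChain (S roots : List (List (String × Int))) : List (List (String × Int)) → Prop
  | nil : pvChain S roots []
  | root (r : List (String × Int)) (h : r ∈ roots) : pvChain S roots [r]
  | cons (v a : List (String × Int)) (anc : List (List (String × Int))) (nid : Int)
      (hch : pvChain S roots (a :: anc))
      (hid : pvId? a = some nid) (hv : v ∈ pvKidsB S (some nid)) :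
      pvChain S roots (v :: a :: anc)

theorem pvChain_sub (S roots : List (List (String × Int)))
    (hroots : ∀ r ∈ roots, r ∈ S)
    (l : List (List (String × Int))) (h : pvChain S roots l) : ∀ x ∈ l, x ∈ S := by
  induction h with
  | nil => intro x hx; cases hx
  | root r hr => intro x hx; rw [List.mem_singleton] at hx; subst hx; exact hroots _ hr
  | cons v a anc nid hchain hid hv ih =>
    intro x hx
    rcases List.mem_cons.mp hx with h1 | h1
    · subst h1; exact (pvKidsB_mem S nid _ hv).1
    · exact ih x h1

-- every non-root element of a chain sits in the kids list of its successor
theorem pvChain_parent (S roots : List (List (String × Int)))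
    (l : List (List (String × Int))) (h : pvChain S roots l) :
    ∀ x ∈ l, x ∈ roots ∨
      ∃ (l₁ l₂ : List (List (String × Int))) (u : List (String × Int)) (nid : Int),
        l = l₁ ++ x :: u :: l₂ ∧ pvId? u = some nid ∧ x ∈ pvKidsB S (some nid) := by
  induction h with
  | nil => intro x hx; cases hx
  | root r hr => intro x hx; rw [List.mem_singleton] at hx; subst hx; exact Or.inl hr
  | cons v a anc nid hchain hid hv ih =>
    intro x hx
    rcases List.mem_cons.mp hx with h1 | h1
    · subst h1; exact Or.inr ⟨[], anc, a, nid, rfl, hid, hv⟩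
    · rcases ih x h1 with h2 | ⟨l₁, l₂, u, nid', heq, hidu, hx'⟩
      · exact Or.inl h2
      · exact Or.inr ⟨v :: l₁, l₂, u, nid', by rw [heq]; rfl, hidu, hx'⟩

theorem pvChain_nodup (S roots : List (List (String × Int)))
    (hroots : ∀ r ∈ roots, r ∈ S ∧ pvPid? r = none)
    (hinj : ∀ p q i, p ∈ S → q ∈ S → pvId? p = some i → pvId? q = some i → p = q)
    (l : List (List (String × Int))) (h : pvChain S roots l) : l.Nodup := by
  induction h with
  | nil => exact List.nodup_nil
  | root r hr => simp
  | cons v a anc nid hchain hid hv ih =>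
    refine List.nodup_cons.mpr ⟨?_, ih⟩
    intro hvmem
    have hpidv : pvPid? v = some nid := (pvKidsB_mem S nid v hv).2
    rcases pvChain_parent S roots _ hchain v hvmem with hroot | ⟨l₁, l₂, u, nid', heq, hidu, hv'⟩
    · rw [(hroots v hroot).2] at hpidv; cases hpidv
    · have hpidv' : pvPid? v = some nid' := (pvKidsB_mem S nid' v hv').2
      have hnideq : nid' = nid := by
        rw [hpidv] at hpidv'; exact (Option.some_inj.mp hpidv').symm
      rw [hnideq] at hidu
      have hsub := pvChain_sub S roots (fun r hr => (hroots r hr).1) _ hchain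
      have hu_mem : u ∈ a :: anc := by rw [heq]; simp
      have hua : u = a := hinj u a nid (hsub u hu_mem) (hsub a (by simp)) hidu hid
      have hanc : u ∈ anc := by
        rcases l₁ with _ | ⟨b, l₁'⟩
        · rw [List.nil_append] at heq
          cases heq; simp
        · rw [List.cons_append] at heq
          cases heq; simp
      rw [hua] at hanc
      exact (List.nodup_cons.mp ih).1 hanc

-- fuel n+1 suffices for B's recursion on Pre_ inputs
theorem pvSuf (S roots : List (List (String × Int)))
    (hroots : ∀ r ∈ roots, r ∈ S ∧ pvPid? r = none)
    (hinj : ∀ p q i, p ∈ S → q ∈ S → pvId? p = some i → pvId? q = some i → p = q) :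
    ∀ (m : Nat) (anc nodes : List (List (String × Int))),
      pvChain S roots anc → S.length - anc.length ≤ m →
      ((anc = [] ∧ ∀ x ∈ nodes, x ∈ roots) ∨
       (∃ a anc', anc = a :: anc' ∧ ∃ nid, pvId? a = some nid ∧
          ∀ x ∈ nodes, x ∈ pvKidsB S (some nid))) →
      pvWalkOK S (S.length + 1 - anc.length) nodes = true := by
  have hrootsS : ∀ r ∈ roots, r ∈ S := fun r hr => (hroots r hr).1
  have hlen : ∀ l, pvChain S roots l → l.length ≤ S.length := by
    intro l hl
    have hnd := pvChain_nodup S roots hroots hinj l hl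
    have hsub : l ⊆ S := fun x hx => pvChain_sub S roots hrootsS l hl x hx
    calc l.length = l.toFinset.card := (List.toFinset_card_of_nodup hnd).symm
      _ ≤ S.toFinset.card := Finset.card_le_card (by
          intro x hx; rw [List.mem_toFinset] at hx ⊢; exact hsub hx)
      _ ≤ S.length := S.toFinset_card_le
  have hchainext : ∀ (anc nodes : List (List (String × Int))), pvChain S roots anc →
      ((anc = [] ∧ ∀ x ∈ nodes, x ∈ roots) ∨
       (∃ a anc', anc = a :: anc' ∧ ∃ nid, pvId? a = some nid ∧
          ∀ x ∈ nodes, x ∈ pvKidsB S (some nid))) →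
      ∀ v ∈ nodes, pvChain S roots (v :: anc) := by
    intro anc nodes hchain hnodes v hv
    rcases hnodes with ⟨hanc, hmem⟩ | ⟨a, anc', heq, nid, hida, hmem⟩
    · subst hanc; exact pvChain.root v (hmem v hv)
    · subst heq; exact pvChain.cons v a anc' nid hchain hida (hmem v hv)
  intro m
  induction m with
  | zero =>
    intro anc nodes hchain hm hnodes
    rcases nodes with _ | ⟨v, rest⟩
    · rcases hf : S.length + 1 - anc.length with _ | f <;> simp [pvWalkOK]
    · exfalso
      have hchain' := hchainext anc _ hchain hnodes v (by simp)
      have := hlen (v :: anc) hchain'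
      simp only [List.length_cons] at this
      omega
  | succ m ih =>
    intro anc nodes hchain hm hnodes
    have hk : anc.length ≤ S.length := hlen anc hchain
    rw [show S.length + 1 - anc.length = (S.length - anc.length) + 1 by omega]
    revert hnodes
    induction nodes with
    | nil => intro _; simp [pvWalkOK]
    | cons v rest ihn =>
      intro hnodes
      have hchain' := hchainext anc _ hchain hnodes v (by simp)
      have hk' : (v :: anc).length ≤ S.length := hlen _ hchain'
      simp only [List.length_cons] at hk'
      simp only [pvWalkOK, Bool.and_eq_true]
      constructor
      · rcases hidn : pvId? v with _ | nid
        · rw [pvKidsB_none]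
          rcases hf : S.length - anc.length with _ | f <;> simp [pvWalkOK]
        · have := ih (v :: anc) (pvKidsB S (some nid)) hchain'
            (by simp only [List.length_cons]; omega)
            (Or.inr ⟨v, anc, rfl, nid, hidn, fun x hx => hx⟩)
          simpa [show S.length + 1 - (v :: anc).length = S.length - anc.length by
            simp only [List.length_cons]; omega] using this
      · apply ihn
        rcases hnodes with ⟨hanc, hmem⟩ | ⟨a, anc', heq, nid, hida, hmem⟩
        · exact Or.inl ⟨hanc, fun x hx => hmem x (List.mem_cons_of_mem _ hx)⟩
        · exact Or.inr ⟨a, anc', heq, nid, hida,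
            fun x hx => hmem x (List.mem_cons_of_mem _ hx)⟩

-- A's accumulator recursion is B's pure recursion, appended (same fuel)
theorem pvBridge (S : List (List (String × Int))) :
    ∀ (f : Nat) (nodes : List (List (String × Int))) (depth : Int)
      (acc : List (List (String × Int))),
      pvRecA (S.foldl pvGroupStep (PySem.Dict.empty, [])).1 f nodes depth acc
        = acc ++ pvWalkB S f nodes depth := by
  intro f
  induction f with
  | zero => intro nodes depth acc; simp [pvRecA, pvWalkB]
  | succ f ihf =>
    intro nodes
    induction nodes with
    | nil => intro depth acc; simp [pvRecA, pvWalkB]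
    | cons node rest ihn =>
      intro depth acc
      simp only [pvRecA, pvWalkB]
      rcases hid : (PySem.Dict.mk (((PySem.Dict.mk node).insert "depth" depth).items)).get? "id"
          with _ | nid
      · have hkids : pvWalkB S f ([] : List (List (String × Int))) (depth + 1) = [] := by
          cases f <;> simp [pvWalkB]
        simp [pvKidsB_none, ihn, hkids]
      · have hch := pvCh_kids S nid
        rcases hg : (S.foldl pvGroupStep (PySem.Dict.empty, [])).1.get? nid with _ | cs
        · rw [PySem.Dict.getD_eq_get?_getD, hg, Option.getD_none] at hch
          have hkids : pvWalkB S f (pvKidsB S (some nid)) (depth + 1) = [] := by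
            rw [← hch]; cases f <;> simp [pvWalkB]
          simp [hg, ihn, hkids]
        · rw [PySem.Dict.getD_eq_get?_getD, hg, Option.getD_some] at hch
          simp only [hg]
          rw [ihn, ihf cs, ← hch]
          simp [List.append_assoc]

-- ===== VERDICT (by name: the statement is the Claim_ definition above) =====
theorem build_period_tree_spec : Claim_equal_build_period_tree := by
  unfold Claim_equal_build_period_tree Spec_build_period_tree
  intro L _hdom hpre
  unfold build_period_tree build_period_tree_alt
  simp only []
  set S := PySem.List.sorted L (fun x => (PySem.Dict.mk x).getD "date1" 0) with hS
  have hlenS : S.length = L.length := PySem.List.length_sorted L _ false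
  have hperm : S.Perm L := PySem.List.sorted_perm L _ false
  have hpreS : (S.filterMap pvId?).Nodup := by
    have hpre' : (L.filterMap pvId?).Nodup := hpre
    exact ((hperm.filterMap pvId?).nodup_iff).mpr hpre'
  have hinj : ∀ p q i, p ∈ S → q ∈ S → pvId? p = some i → pvId? q = some i → p = q := by
    intro p q i hp hq hip hiq
    by_contra hne
    have hpw := List.pairwise_filterMap.mp hpreS
    have hR := hpw.forall (by
      intro a b hab x hx y hy
      exact (hab y hy x hx).symm) hp hq hne
    exact hR i hip i hiq rfl
  have hfilters :
      S.filter (fun p => (pvPid? p).isNone)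
        = S.filter (fun (p : List (String × Int)) =>
            match (PySem.Dict.mk p).get? "parentId" with
            | none => true
            | some v => v == 0) := by
    apply List.filter_congr
    intro p _
    unfold pvPid?
    rcases h : (PySem.Dict.mk p).get? "parentId" with _ | v
    · simp
    · by_cases hv : v = 0 <;> simp [hv]
  have hroots : ∀ r ∈ S.filter (fun (p : List (String × Int)) =>
      match (PySem.Dict.mk p).get? "parentId" with
      | none => true
      | some v => v == 0), r ∈ S ∧ pvPid? r = none := by
    intro r hr
    rw [← hfilters, List.mem_filter] at hr
    exact ⟨hr.1, by simpa using hr.2⟩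
  have hOK : pvWalkOK S (L.length + 1) (S.filter (fun (p : List (String × Int)) =>
      match (PySem.Dict.mk p).get? "parentId" with
      | none => true
      | some v => v == 0)) = true := by
    have h := pvSuf S _ hroots hinj S.length [] _ pvChain.nil
      (by simp) (Or.inl ⟨rfl, fun x hx => hx⟩)
    simpa [hlenS] using h
  have hmono := pvWalkB_mono S (L.length + 1) _ hOK
    (L.length * (L.length + 1) ^ (L.length + 1) + 1)
    (by nlinarith [Nat.one_le_pow (L.length + 1) (L.length + 1) (by omega)]) 0
  rw [pvBridge S (L.length + 1) _ 0 []]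
  rw [pvGroup_snd S PySem.Dict.empty []]
  simp only [List.nil_append]
  rw [hfilters]
  exact hmono.symm
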